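-- pv_equiv track=rewrite | github.com/potatooha/aircrakk | utils/parsing.py | split_to_columns
-- ===== SOURCE A (Python) =====
-- def split_to_columns(text: str, widths: list[int]) -> list[str]:
--     columns = []
--
--     for width in widths:
--         width = len(text) if width < 0 else width
--
--         column = text[:width]
--         columns.append(column)
--
--         text = text[width:]
--
--     return columns
-- ===== SOURCE B (Python) =====
-- def split_to_columns(text: str, widths: list[int]) -> list[str]:
--     n = len(text)
--     bounds = [0]
--     for w in widths:
--         bounds.append(n if w < 0 else min(bounds[-1] + w, n))
--     return [text[a:b] for a, b in zip(bounds, bounds[1:])]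
-- ===== Notes on version B (the rewrite author's own statement) =====
-- stated objective: alternative
-- what changed: B precomputes absolute column boundaries into a prefix table in one pass and then slices the original string between adjacent boundaries, instead of A's loop that repeatedly reslices and reassigns a shrinking text.
import Mathlib
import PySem

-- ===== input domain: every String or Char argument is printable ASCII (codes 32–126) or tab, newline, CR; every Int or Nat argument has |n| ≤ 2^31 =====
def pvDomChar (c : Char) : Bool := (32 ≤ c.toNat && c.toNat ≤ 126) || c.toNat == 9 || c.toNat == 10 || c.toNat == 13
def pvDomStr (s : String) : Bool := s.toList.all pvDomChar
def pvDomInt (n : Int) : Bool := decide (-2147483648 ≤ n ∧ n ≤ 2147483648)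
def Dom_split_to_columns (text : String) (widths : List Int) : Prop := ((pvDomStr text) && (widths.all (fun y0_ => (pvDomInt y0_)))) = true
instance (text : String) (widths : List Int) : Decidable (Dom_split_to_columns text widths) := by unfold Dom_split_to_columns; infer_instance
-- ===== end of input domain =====

-- B builds the absolute boundary table first and slices the original string; A reslices a shrinking remainder.
-- ===== PORT A =====
def split_to_columns (text : String) (widths : List Int) : List String :=
  (widths.foldl (fun (st : List String × String) width =>
      let w := if width < 0 then PySem.Str.len st.2 else width
      (st.1 ++ [PySem.Str.slice st.2 none (some w)], PySem.Str.slice st.2 (some w) none))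
    ([], text)).1

-- ===== PORT B =====
def split_to_columns_alt (text : String) (widths : List Int) : List String :=
  let n := PySem.Str.len text
  let bounds := widths.foldl
    (fun (bs : List Int) w => bs ++ [if w < 0 then n else min (PySem.List.pyGetD bs (-1) 0 + w) n]) [0]
  (bounds.zip (PySem.List.slice bounds (some 1) none)).map
    (fun ab => PySem.Str.slice text (some ab.1) (some ab.2))

-- ===== PRECONDITION & SPEC =====
def Spec_split_to_columns (text : String) (widths : List Int) (out : List String) : Prop := out = split_to_columns_alt text widths
instance (text : String) (widths : List Int) (out : List String) : Decidable (Spec_split_to_columns text widths out) := by unfold Spec_split_to_columns; infer_instance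

-- ===== CLAIM (what is proved, stated in full; the proofs are below) =====
def Claim_equal_split_to_columns : Prop := ∀ (text : String) (widths : List Int), Dom_split_to_columns text widths → Spec_split_to_columns text widths (split_to_columns text widths)

-- ===== LEMMAS AND PROOFS =====

-- ===== VERDICT (by name: the statement is the Claim_ definition above) =====
-- proof helpers: A's loop and B's boundary loop, unfolded
def goA (s : String) : List Int → List String
  | [] => []
  | w :: ws =>
    let w' := if w < 0 then PySem.Str.len s else w
    PySem.Str.slice s none (some w') :: goA (PySem.Str.slice s (some w') none) ws

def goB (n : Int) (cur : Int) : List Int → List Int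
  | [] => []
  | w :: ws =>
    let b := if w < 0 then n else min (cur + w) n
    b :: goB n b ws

theorem take_min_self {α : Type} (l : List α) (k : Nat) : l.take (min k l.length) = l.take k := by
  rcases Nat.le_total k l.length with h | h
  · rw [min_eq_left h]
  · rw [min_eq_right h, List.take_of_length_le h, List.take_of_length_le (le_refl _)]

theorem aFold (ws : List Int) (acc : List String) (s : String) :
    (ws.foldl (fun (st : List String × String) width =>
        let w := if width < 0 then PySem.Str.len st.2 else width
        (st.1 ++ [PySem.Str.slice st.2 none (some w)], PySem.Str.slice st.2 (some w) none))
      (acc, s)).1 = acc ++ goA s ws := by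
  induction ws generalizing acc s with
  | nil => simp [goA]
  | cons w ws ih =>
    rw [List.foldl_cons]
    show (List.foldl _ (acc ++ [_], _) ws).1 = _
    rw [ih]
    simp [goA]

theorem bFold (ws : List Int) (n : Int) (bs : List Int) (x : Int) :
    (ws.foldl (fun (bs : List Int) w =>
        bs ++ [if w < 0 then n else min (PySem.List.pyGetD bs (-1) 0 + w) n]) (bs ++ [x]))
      = bs ++ x :: goB n x ws := by
  induction ws generalizing bs x with
  | nil => simp [goB]
  | cons w ws ih =>
    rw [List.foldl_cons]
    simp only [PySem.List.pyGetD_neg_one_append_singleton]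
    rw [ih (bs ++ [x])]
    simp [goB]

theorem main (cs : List Char) (ws : List Int) (a : Int) (h0 : 0 ≤ a) (hn : a ≤ (cs.length : Int)) :
    goA (String.ofList (cs.drop a.toNat)) ws =
      List.zipWith (fun p q => String.ofList (PySem.List.slice cs (some p) (some q)))
        (a :: goB (cs.length : Int) a ws) (goB (cs.length : Int) a ws) := by
  induction ws generalizing a with
  | nil => simp [goA, goB]
  | cons w ws ih =>
    by_cases hw : w < 0
    · simp only [goA, goB, if_pos hw, List.zipWith_cons_cons]
      have hlen : PySem.Str.len (String.ofList (cs.drop a.toNat))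
          = ((cs.drop a.toNat).length : Int) := by
        simp [PySem.Str.len]
      rw [hlen]
      congr 1
      · simp only [PySem.Str.slice, PySem.Chars.slice, String.toList_ofList]
        rw [PySem.List.slice_to_natCast, List.take_length,
          PySem.List.slice_toNat cs h0 (by positivity)]
        rw [List.take_of_length_le (by simp)]
      · have hrw : PySem.Str.slice (String.ofList (cs.drop a.toNat))
            (some ((cs.drop a.toNat).length : Int)) none
            = String.ofList (cs.drop ((cs.length : Int)).toNat) := by
          simp only [PySem.Str.slice, PySem.Chars.slice, String.toList_ofList]
          rw [PySem.List.slice_from _ (by positivity)]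
          simp
          omega
        rw [hrw, ih (cs.length : Int) (by positivity) (le_refl _)]
    · have hw' : (0:Int) ≤ w := not_lt.mp hw
      simp only [goA, goB, if_neg hw, List.zipWith_cons_cons]
      have ha' : (a.toNat : Int) = a := Int.toNat_of_nonneg h0
      have hb0 : (0:Int) ≤ min (a + w) (cs.length : Int) := by positivity
      have hbn : min (a + w) (cs.length : Int) ≤ (cs.length : Int) := min_le_right _ _
      have hbt : (min (a + w) (cs.length : Int)).toNat
          = min (a.toNat + w.toNat) cs.length := by omega
      congr 1
      · simp only [PySem.Str.slice, PySem.Chars.slice, String.toList_ofList]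
        rw [PySem.List.slice_to _ hw', PySem.List.slice_toNat cs h0 hb0, hbt]
        have : min (a.toNat + w.toNat) cs.length - a.toNat
            = min w.toNat ((cs.drop a.toNat).length) := by simp; omega
        rw [this, take_min_self]
      · have hrw : PySem.Str.slice (String.ofList (cs.drop a.toNat)) (some w) none
            = String.ofList (cs.drop ((min (a + w) (cs.length : Int)).toNat)) := by
          simp only [PySem.Str.slice, PySem.Chars.slice, String.toList_ofList]
          rw [PySem.List.slice_from _ hw', List.drop_drop, hbt]
          rcases Nat.le_total (a.toNat + w.toNat) cs.length with h | h
          · rw [min_eq_left h, Nat.add_comm]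
          · rw [min_eq_right h, List.drop_length,
              List.drop_eq_nil_of_le (by omega)]
        rw [hrw, ih _ hb0 hbn]
theorem bFold0 (ws : List Int) (n : Int) :
    (ws.foldl (fun (bs : List Int) w =>
        bs ++ [if w < 0 then n else min (PySem.List.pyGetD bs (-1) 0 + w) n]) [0])
      = 0 :: goB n 0 ws := by
  simpa using bFold ws n [] 0

theorem split_to_columns_spec : Claim_equal_split_to_columns := by
  intro text widths _
  show split_to_columns text widths = split_to_columns_alt text widths
  unfold split_to_columns split_to_columns_alt
  rw [aFold]
  have hn : PySem.Str.len text = (text.toList.length : Int) := by simp [PySem.Str.len]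
  simp only [hn, bFold0, PySem.List.slice_from_one, List.tail_cons, List.nil_append]
  have hmain := main text.toList widths 0 (le_refl 0) (by positivity)
  simp only [Int.toNat_zero, List.drop_zero, String.ofList_toList] at hmain
  rw [hmain, ← List.map_uncurry_zip_eq_zipWith]
  rfl
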